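-- pv_equiv track=rewrite | github.com/HEchooo/product-predict | preserve_style_translate.py | select_bands_for_k
-- ===== SOURCE A (Python) =====
-- from typing import Any, Dict, List, Optional, Tuple
--
-- def merge_bands_to_k(bands: List[Tuple[int,int]], k: int) -> List[Tuple[int,int]]:
--     if k <= 0:
--         return []
--     b = [list(x) for x in bands]
--     while len(b) > k:
--         gaps = []
--         for i in range(len(b)-1):
--             gap = b[i+1][0] - b[i][1]
--             gaps.append((gap, i))
--         gaps.sort(key=lambda x: x[0])
--         _, i = gaps[0]
--         b[i][1] = b[i+1][1]
--         del b[i+1]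
--     return [(int(x[0]), int(x[1])) for x in b]
--
-- def uniform_bands(mask_h: int, k: int) -> List[Tuple[int,int]]:
--     if k <= 0:
--         return []
--     mask_h = max(1, int(mask_h))
--     base = mask_h // k
--     rem = mask_h % k
--     bands = []
--     y = 0
--     for i in range(k):
--         hh = base + (1 if i < rem else 0)
--         y0, y1 = y, y + max(1, hh)
--         bands.append((y0, y1))
--         y = y1
--     bands[-1] = (bands[-1][0], mask_h)
--     return bands
--
-- def select_bands_for_k(raw: List[Tuple[int,int]], k: int, mask_h: int) -> List[Tuple[int,int]]:
--     if k <= 1: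
--         return [(0, mask_h)]
--     raw = [(max(0,y0), min(mask_h,y1)) for (y0,y1) in (raw or []) if y1 > y0]
--     raw.sort(key=lambda x: x[0])
--
--     if len(raw) == k:
--         return raw
--     if len(raw) > k:
--         return merge_bands_to_k(raw, k)
--     return uniform_bands(mask_h, k)
-- ===== SOURCE B (Python) =====
-- def select_bands_for_k(raw, k, mask_h):
--     if k <= 1:
--         return [(0, mask_h)]
--     bands = sorted([(max(0, y0), min(mask_h, y1)) for (y0, y1) in (raw or []) if y1 > y0],
--                    key=lambda x: x[0])
--     n = len(bands)
--     if n == k: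
--         return bands
--     if n > k:
--         # merging two neighbours never changes any other gap, so repeatedly merging
--         # the smallest gap == dropping the n-k lexicographically smallest (gap, index)
--         # pairs in one shot, then cutting the sorted bands at the surviving gaps.
--         gaps = sorted((bands[i + 1][0] - bands[i][1], i) for i in range(n - 1))
--         cuts = sorted(i for (_, i) in gaps[n - k:])
--         out = []
--         start = 0
--         for c in cuts:
--             out.append((bands[start][0], bands[c][1]))
--             start = c + 1
--         out.append((bands[start][0], bands[n - 1][1]))
--         return out
--     # n < k: uniform bands in closed form
--     mh = max(1, int(mask_h))
--     base, rem = divmod(mh, k)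
--     def y(i):
--         return i * base + min(i, rem) if base >= 1 else i
--     return [(y(i), y(i + 1)) for i in range(k - 1)] + [(y(k - 1), mh)]
-- ===== Notes on version B (the rewrite author's own statement) =====
-- stated objective: alternative
-- what changed: Merging two neighbouring bands never changes any other gap, so B replaces A's while-loop (re-build, re-sort and min-scan the gap list once per merge) by a single sort of all (gap, index) pairs, dropping the n-k smallest and cutting the sorted bands at the surviving gaps in one pass; the uniform-bands accumulator loop is replaced by a closed-form formula.
import Mathlib
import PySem

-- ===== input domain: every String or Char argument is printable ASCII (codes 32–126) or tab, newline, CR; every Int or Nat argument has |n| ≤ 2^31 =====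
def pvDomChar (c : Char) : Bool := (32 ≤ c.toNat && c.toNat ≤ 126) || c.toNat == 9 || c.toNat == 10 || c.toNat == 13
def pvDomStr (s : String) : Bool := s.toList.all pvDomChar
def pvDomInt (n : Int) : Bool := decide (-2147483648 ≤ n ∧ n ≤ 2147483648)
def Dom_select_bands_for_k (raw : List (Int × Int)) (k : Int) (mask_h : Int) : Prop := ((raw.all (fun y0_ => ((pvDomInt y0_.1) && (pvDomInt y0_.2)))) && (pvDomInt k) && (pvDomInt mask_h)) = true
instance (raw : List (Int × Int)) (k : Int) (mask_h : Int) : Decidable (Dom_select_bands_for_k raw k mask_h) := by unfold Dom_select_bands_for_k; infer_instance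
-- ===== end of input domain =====

-- B replaces A's repeated rebuild-sort-merge of the smallest gap by one sort of all (gap, index)
-- pairs (gaps never change when neighbours merge), dropping the n-k smallest at once, and A's
-- uniform-band accumulator loop by a closed form; objective: alternative single-sort algorithm.


-- ===== PORT A =====
-- gap = b[i+1][0] - b[i][1]; gaps.append((gap, i))   (shared verbatim by both Pythons)
def pvGap (b : List (Int × Int)) (i : Nat) : Int :=
  (b.getD (i+1) (0, 0)).1 - (b.getD i (0, 0)).2

def pvGapsA (b : List (Int × Int)) : List (Int × Nat) :=
  (List.range (b.length - 1)).map (fun i => (pvGap b i, i))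

-- the `while len(b) > k` loop of merge_bands_to_k; fuel = initial length (the loop shrinks b by 1 each pass)
def pvMergeLoopA (k : Int) : Nat → List (Int × Int) → List (Int × Int)
  | 0, b => b
  | fuel+1, b =>
    if (b.length : Int) > k then
      match PySem.List.sorted (pvGapsA b) (fun x => x.1) false with
      | [] => b   -- unreachable when len(b) ≥ 2; totality guard only
      | (_, i) :: _ =>
          pvMergeLoopA k fuel
            (b.take i ++ [((b.getD i (0, 0)).1, (b.getD (i+1) (0, 0)).2)] ++ b.drop (i+2))
    else b

def merge_bands_to_k (bands : List (Int × Int)) (k : Int) : List (Int × Int) :=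
  if k ≤ 0 then [] else pvMergeLoopA k bands.length bands

def uniform_bands (mask_h : Int) (k : Int) : List (Int × Int) :=
  if k ≤ 0 then [] else
    let mh := max 1 mask_h
    let base := PySem.Int.floordiv mh k
    let rem := PySem.Int.mod mh k
    let st := (List.range k.toNat).foldl
      (fun (acc : List (Int × Int) × Int) (i : Nat) =>
        (acc.1 ++ [(acc.2, acc.2 + max 1 (base + (if (i : Int) < rem then 1 else 0)))],
         acc.2 + max 1 (base + (if (i : Int) < rem then 1 else 0)))) ([], 0)
    st.1.dropLast ++ [((st.1.getLastD (0, 0)).1, mh)]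

def select_bands_for_k (raw : List (Int × Int)) (k : Int) (mask_h : Int) : List (Int × Int) :=
  if k ≤ 1 then [(0, mask_h)] else
  let raw1 := PySem.List.sorted
    ((raw.filter (fun p => p.2 > p.1)).map (fun p => (max 0 p.1, min mask_h p.2)))
    (fun x => x.1) false
  if (raw1.length : Int) = k then raw1
  else if (raw1.length : Int) > k then merge_bands_to_k raw1 k
  else uniform_bands mask_h k

-- ===== PORT B =====
-- the `for c in cuts` reconstruction loop of Source B (state: out, start)
def pvCutBands (bands : List (Int × Int)) : List Nat → Nat → List (Int × Int)
  | [], start => [((bands.getD start (0, 0)).1, (bands.getD (bands.length - 1) (0, 0)).2)]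
  | c :: cs, start => ((bands.getD start (0, 0)).1, (bands.getD c (0, 0)).2) :: pvCutBands bands cs (c+1)

-- Source B's closed-form y(i)
def pvUniY (base rem : Int) (i : Nat) : Int :=
  if base ≥ 1 then (i : Int) * base + min (i : Int) rem else (i : Int)

def select_bands_for_k_alt (raw : List (Int × Int)) (k : Int) (mask_h : Int) : List (Int × Int) :=
  if k ≤ 1 then [(0, mask_h)] else
  let bands := PySem.List.sorted
    ((raw.filter (fun p => p.2 > p.1)).map (fun p => (max 0 p.1, min mask_h p.2)))
    (fun x => x.1) false
  let n := bands.length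
  if (n : Int) = k then bands
  else if (n : Int) > k then
    let gaps := pvGapsA bands
    let kept := (PySem.List.sorted2 gaps (fun x => x.1) (fun x => x.2) false).drop (bands.length - k.toNat)
    let cuts := PySem.List.sorted (kept.map (fun p => p.2)) (fun x => x) false
    pvCutBands bands cuts 0
  else
    let mh := max 1 mask_h
    let base := PySem.Int.floordiv mh k
    let rem := PySem.Int.mod mh k
    (List.range (k.toNat - 1)).map (fun i => (pvUniY base rem i, pvUniY base rem (i+1)))
      ++ [(pvUniY base rem (k.toNat - 1), mh)]

-- ===== PRECONDITION & SPEC =====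
def Spec_select_bands_for_k (raw : List (Int × Int)) (k : Int) (mask_h : Int) (out : List (Int × Int)) : Prop := out = select_bands_for_k_alt raw k mask_h
instance (raw : List (Int × Int)) (k : Int) (mask_h : Int) (out : List (Int × Int)) : Decidable (Spec_select_bands_for_k raw k mask_h out) := by unfold Spec_select_bands_for_k; infer_instance

-- ===== CLAIM (what is proved, stated in full; the proofs are below) =====
def Claim_equal_select_bands_for_k : Prop := ∀ (raw : List (Int × Int)) (k : Int) (mask_h : Int), Dom_select_bands_for_k raw k mask_h → Spec_select_bands_for_k raw k mask_h (select_bands_for_k raw k mask_h)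

-- ===== LEMMAS AND PROOFS =====

-- lexicographic strict order on (gap, index) pairs
def pvLexLt (a b : Int × Nat) : Prop := a.1 < b.1 ∨ (a.1 = b.1 ∧ a.2 < b.2)

theorem pvLexLt_trans {a b c : Int × Nat} (h1 : pvLexLt a b) (h2 : pvLexLt b c) : pvLexLt a c := by
  unfold pvLexLt at *; omega

-- stability of insertion by fst only: the new element has larger snd than everything present
theorem pvIns_fst (x : Int × Nat) (ys : List (Int × Nat))
    (h : ys.Pairwise pvLexLt) (hx : ∀ y ∈ ys, y.2 < x.2) :
    (PySem.List.insertBy (fun a b => decide (a.1 < b.1)) x ys).Pairwise pvLexLt := by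
  induction ys with
  | nil => simp [PySem.List.insertBy, pvLexLt]
  | cons y ys ih =>
    rw [List.pairwise_cons] at h
    by_cases hb : x.1 < y.1
    · have he : PySem.List.insertBy (fun a b => decide (a.1 < b.1)) x (y :: ys) = x :: y :: ys := by
        simp [PySem.List.insertBy, hb]
      rw [he, List.pairwise_cons]
      refine ⟨?_, List.pairwise_cons.2 h⟩
      intro z hz
      rcases List.mem_cons.1 hz with rfl | hz'
      · exact Or.inl hb
      · have := h.1 z hz'
        unfold pvLexLt at this ⊢; omega
    · have he : PySem.List.insertBy (fun a b => decide (a.1 < b.1)) x (y :: ys)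
          = y :: PySem.List.insertBy (fun a b => decide (a.1 < b.1)) x ys := by
        simp [PySem.List.insertBy, hb]
      rw [he, List.pairwise_cons]
      refine ⟨?_, ih h.2 (fun y' m => hx y' (List.mem_cons_of_mem _ m))⟩
      intro z hz
      rcases (PySem.List.insertBy_mem_iff _ x z ys).1 hz with rfl | hz'
      · have h2 := hx y (List.mem_cons_self ..)
        unfold pvLexLt; omega
      · exact h.1 z hz'

-- stability of insertion by the full (fst, snd) comparison
theorem pvIns_lex (x : Int × Nat) (ys : List (Int × Nat))
    (h : ys.Pairwise pvLexLt) (hx : ∀ y ∈ ys, y.2 < x.2) :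
    (PySem.List.insertBy (fun a b => decide (a.1 < b.1) || (!decide (b.1 < a.1) && decide (a.2 < b.2))) x ys).Pairwise pvLexLt := by
  induction ys with
  | nil => simp [PySem.List.insertBy, pvLexLt]
  | cons y ys ih =>
    rw [List.pairwise_cons] at h
    by_cases hb : (decide (x.1 < y.1) || (!decide (y.1 < x.1) && decide (x.2 < y.2))) = true
    · have he : PySem.List.insertBy (fun a b => decide (a.1 < b.1) || (!decide (b.1 < a.1) && decide (a.2 < b.2))) x (y :: ys) = x :: y :: ys := by
        simp [PySem.List.insertBy, hb]
      have hxy : pvLexLt x y := by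
        simp only [Bool.or_eq_true, Bool.and_eq_true, Bool.not_eq_eq_eq_not, Bool.not_true,
          decide_eq_true_eq, decide_eq_false_iff_not] at hb
        unfold pvLexLt; omega
      rw [he, List.pairwise_cons]
      refine ⟨?_, List.pairwise_cons.2 h⟩
      intro z hz
      rcases List.mem_cons.1 hz with rfl | hz'
      · exact hxy
      · exact pvLexLt_trans hxy (h.1 z hz')
    · have he : PySem.List.insertBy (fun a b => decide (a.1 < b.1) || (!decide (b.1 < a.1) && decide (a.2 < b.2))) x (y :: ys)
          = y :: PySem.List.insertBy (fun a b => decide (a.1 < b.1) || (!decide (b.1 < a.1) && decide (a.2 < b.2))) x ys := by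
        simp [PySem.List.insertBy, hb]
      rw [he, List.pairwise_cons]
      refine ⟨?_, ih h.2 (fun y' m => hx y' (List.mem_cons_of_mem _ m))⟩
      intro z hz
      rcases (PySem.List.insertBy_mem_iff _ x z ys).1 hz with rfl | hz'
      · have h2 := hx y (List.mem_cons_self ..)
        simp only [Bool.or_eq_true, Bool.and_eq_true, Bool.not_eq_eq_eq_not, Bool.not_true,
          decide_eq_true_eq, decide_eq_false_iff_not] at hb
        unfold pvLexLt; omega
      · exact h.1 z hz'

-- folding such an insertion over a snd-increasing list keeps the accumulator pairwise-lex
theorem pvFoldIns_pairwise (before : Int × Nat → Int × Nat → Bool)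
    (hins : ∀ (x : Int × Nat) (ys : List (Int × Nat)), ys.Pairwise pvLexLt →
      (∀ y ∈ ys, y.2 < x.2) → (PySem.List.insertBy before x ys).Pairwise pvLexLt) :
    ∀ (gs acc : List (Int × Nat)), acc.Pairwise pvLexLt →
      (∀ a ∈ acc, ∀ z ∈ gs, a.2 < z.2) → gs.Pairwise (fun a b => a.2 < b.2) →
      (gs.foldl (fun acc x => PySem.List.insertBy before x acc) acc).Pairwise pvLexLt := by
  intro gs
  induction gs with
  | nil => intro acc h _ _; simpa using h
  | cons x gs ih =>
    intro acc h hacc hgs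
    rw [List.pairwise_cons] at hgs
    simp only [List.foldl_cons]
    apply ih
    · exact hins x acc h (fun y hy => hacc y hy x (List.mem_cons_self ..))
    · intro a ha z hz
      rcases (PySem.List.insertBy_mem_iff _ x a acc).1 ha with rfl | ha'
      · exact hgs.1 z hz
      · exact hacc a ha' z (List.mem_cons_of_mem _ hz)
    · exact hgs.2

-- sorting by fst alone is lexicographic when snd is strictly increasing along the input
theorem pvSortedA_pairwise (gs : List (Int × Nat)) (h : gs.Pairwise (fun a b => a.2 < b.2)) :
    (PySem.List.sorted gs (fun x => x.1) false).Pairwise pvLexLt := by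
  rw [show PySem.List.sorted gs (fun x => x.1) false
      = gs.foldl (fun acc x => PySem.List.insertBy (fun a b => decide (a.1 < b.1)) x acc) [] from
    PySem.List.sorted_eq_foldl_insertBy gs (fun x => x.1)]
  exact pvFoldIns_pairwise _ pvIns_fst gs [] (by simp) (by simp) h

-- sorted2 by (fst, snd) is pairwise-lex when snd is strictly increasing along the input
theorem pvSorted2_pairwise (gs : List (Int × Nat)) (h : gs.Pairwise (fun a b => a.2 < b.2)) :
    (PySem.List.sorted2 gs (fun x => x.1) (fun x => x.2) false).Pairwise pvLexLt := by
  rw [show PySem.List.sorted2 gs (fun x => x.1) (fun x => x.2) false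
      = gs.foldl (fun acc x => PySem.List.insertBy
          (fun a b => decide (a.1 < b.1) || (!decide (b.1 < a.1) && decide (a.2 < b.2))) x acc) [] from rfl]
  exact pvFoldIns_pairwise _ pvIns_lex gs [] (by simp) (by simp) h

-- the head of a pairwise-lex arrangement is a least element of the underlying list
theorem pvHead_least {gs L : List (Int × Nat)} {p : Int × Nat} {T : List (Int × Nat)}
    (hperm : gs.Perm L) (hL : L.Pairwise pvLexLt) (hcons : L = p :: T) :
    ∀ q ∈ gs, q = p ∨ pvLexLt p q := by
  subst hcons
  intro q hq
  have hq' : q ∈ p :: T := hperm.mem_iff.1 hq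
  rw [List.pairwise_cons] at hL
  rcases List.mem_cons.1 hq' with rfl | hmem
  · exact Or.inl rfl
  · exact Or.inr (hL.1 q hmem)


-- index tags of zipIdx are strictly increasing
theorem pvZipIdx_sndlt (l : List Int) : ∀ n : Nat, (l.zipIdx n).Pairwise (fun a b => a.2 < b.2) := by
  induction l with
  | nil => intro n; simp
  | cons v l ih =>
    intro n
    rw [List.zipIdx_cons, List.pairwise_cons]
    refine ⟨?_, ih (n+1)⟩
    rintro ⟨z, i⟩ hz
    have := List.mem_zipIdx hz
    simp only
    omega

theorem pvZipIdx_shift (l : List Int) : ∀ n : Nat,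
    (l.zipIdx n).map (fun p => (p.1, p.2 + 1)) = l.zipIdx (n + 1) := by
  induction l with
  | nil => intro n; simp
  | cons v l ih => intro n; simp [List.zipIdx_cons, ih (n+1)]

-- the head start-coordinate of any reconstruction
theorem pvCutBands_head (B0 : List (Int × Int)) (S : List Nat) (s : Nat) :
    ∃ z t, pvCutBands B0 S s = ((B0.getD s (0, 0)).1, z) :: t := by
  cases S with
  | nil => exact ⟨_, _, rfl⟩
  | cons c cs => exact ⟨_, _, rfl⟩

theorem pvGap_cons (x : Int × Int) (l : List (Int × Int)) (i : Nat) :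
    pvGap (x :: l) (i + 1) = pvGap l i := rfl

theorem pvGapsA_cons (x y : Int × Int) (rest : List (Int × Int)) :
    pvGapsA (x :: y :: rest) = (y.1 - x.2, 0) :: (pvGapsA (y :: rest)).map (fun p => (p.1, p.2 + 1)) := by
  unfold pvGapsA
  have hlen : (x :: y :: rest).length - 1 = ((y :: rest).length - 1) + 1 := by simp
  rw [hlen, List.range_succ_eq_map, List.map_cons, List.map_map, List.map_map]
  refine congrArg₂ _ rfl ?_
  apply List.map_congr_left
  intro i _
  simp [Function.comp, pvGap_cons]

theorem pvGapsA_cutBands (B0 : List (Int × Int)) : ∀ (S : List Nat) (start : Nat),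
    pvGapsA (pvCutBands B0 S start) = (S.map (pvGap B0)).zipIdx 0 := by
  intro S
  induction S with
  | nil => intro start; simp [pvCutBands, pvGapsA]
  | cons c cs ih =>
    intro start
    have hcons : pvCutBands B0 (c :: cs) start
        = ((B0.getD start (0, 0)).1, (B0.getD c (0, 0)).2) :: pvCutBands B0 cs (c+1) := rfl
    obtain ⟨z, t, hR⟩ := pvCutBands_head B0 cs (c+1)
    rw [hcons, hR, pvGapsA_cons, ← hR, ih]
    rw [List.map_cons, List.zipIdx_cons, pvZipIdx_shift]
    rfl

theorem pvCutBands_length (B0 : List (Int × Int)) : ∀ (S : List Nat) (start : Nat),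
    (pvCutBands B0 S start).length = S.length + 1 := by
  intro S
  induction S with
  | nil => intro start; rfl
  | cons c cs ih => intro start; simp [pvCutBands, ih (c+1)]

-- the merge surgery at position j is exactly erasing cut j
theorem pvSurgery (B0 : List (Int × Int)) : ∀ (S : List Nat) (start j : Nat), j < S.length →
    (pvCutBands B0 S start).take j
      ++ [(((pvCutBands B0 S start).getD j (0, 0)).1, ((pvCutBands B0 S start).getD (j+1) (0, 0)).2)]
      ++ (pvCutBands B0 S start).drop (j+2)
    = pvCutBands B0 (S.eraseIdx j) start := by
  intro S
  induction S with
  | nil => intro start j hj; simp at hj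
  | cons c cs ih =>
    intro start j hj
    cases j with
    | zero =>
      cases cs with
      | nil => rfl
      | cons c' cs' => rfl
    | succ j' =>
      have hj' : j' < cs.length := by simpa using hj
      have hcons : pvCutBands B0 (c :: cs) start
          = ((B0.getD start (0, 0)).1, (B0.getD c (0, 0)).2) :: pvCutBands B0 cs (c+1) := rfl
      rw [hcons]
      simp only [List.take_succ_cons, List.getD_cons_succ, List.drop_succ_cons,
        List.eraseIdx_cons_succ]
      rw [show pvCutBands B0 (c :: cs.eraseIdx j') start
          = ((B0.getD start (0, 0)).1, (B0.getD c (0, 0)).2) :: pvCutBands B0 (cs.eraseIdx j') (c+1) from rfl]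
      rw [← ih (c+1) j' hj']
      simp

-- cutting everywhere reconstructs the band list
theorem pvCutBands_range' (B0 : List (Int × Int)) : ∀ (t s : Nat), s + t + 1 = B0.length →
    pvCutBands B0 (List.range' s t) s = B0.drop s := by
  intro t
  induction t with
  | zero =>
    intro s hs
    have hlt : s < B0.length := by omega
    rw [List.range'_zero]
    show [((B0.getD s (0, 0)).1, (B0.getD (B0.length - 1) (0, 0)).2)] = B0.drop s
    rw [List.drop_eq_getElem_cons hlt]
    have h1 : B0.length - 1 = s := by omega
    have h2 : B0.drop (s+1) = [] := by
      apply List.drop_eq_nil_of_le; omega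
    rw [h2, h1, List.getD_eq_getElem _ _ hlt]
  | succ t ih =>
    intro s hs
    have hlt : s < B0.length := by omega
    rw [List.range'_succ]
    show ((B0.getD s (0, 0)).1, (B0.getD s (0, 0)).2) :: pvCutBands B0 (List.range' (s+1) t) (s+1) = B0.drop s
    rw [ih (s+1) (by omega), List.drop_eq_getElem_cons hlt, List.getD_eq_getElem _ _ hlt]

theorem pvCutBands_range (B0 : List (Int × Int)) (h : B0 ≠ []) :
    pvCutBands B0 (List.range (B0.length - 1)) 0 = B0 := by
  have hlen : 0 < B0.length := List.length_pos_iff.2 h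
  rw [List.range_eq_range']
  rw [pvCutBands_range' B0 (B0.length - 1) 0 (by omega)]
  simp

-- the loop's chosen position is the position of the lexicographically least surviving gap
theorem pvLoopA (B0 : List (Int × Int)) (k : Int) (hk : 2 ≤ k) :
    ∀ (fuel : Nat) (S : List Nat) (L : List (Int × Nat)),
      S.Pairwise (· < ·) →
      (S.map (fun i => (pvGap B0 i, i))).Perm L →
      L.Pairwise pvLexLt →
      S.length ≤ fuel →
      pvMergeLoopA k fuel (pvCutBands B0 S 0)
        = pvCutBands B0
            (PySem.List.sorted ((L.drop (S.length + 1 - k.toNat)).map (fun p => p.2)) (fun x => x) false) 0 := by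
  intro fuel
  induction fuel with
  | zero =>
    intro S L hS hperm hL hfuel
    have hS0 : S = [] := by cases S with | nil => rfl | cons a t => simp at hfuel
    subst hS0
    have hL0 : L = [] := by
      have h := hperm.symm
      simp only [List.map_nil] at h
      exact h.eq_nil
    subst hL0
    rw [show pvMergeLoopA k 0 (pvCutBands B0 [] 0) = pvCutBands B0 [] 0 from by simp [pvMergeLoopA]]
    rw [show List.drop (([] : List Nat).length + 1 - k.toNat) ([] : List (Int × Nat)) = [] from by simp]
    rfl
  | succ fuel ih =>
    intro S L hS hperm hL hfuel
    rw [show pvMergeLoopA k (fuel+1) (pvCutBands B0 S 0)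
        = if ((pvCutBands B0 S 0).length : Int) > k then
            match PySem.List.sorted (pvGapsA (pvCutBands B0 S 0)) (fun x => x.1) false with
            | [] => pvCutBands B0 S 0
            | (_, i) :: _ =>
                pvMergeLoopA k fuel
                  ((pvCutBands B0 S 0).take i
                    ++ [(((pvCutBands B0 S 0).getD i (0, 0)).1, ((pvCutBands B0 S 0).getD (i+1) (0, 0)).2)]
                    ++ (pvCutBands B0 S 0).drop (i+2))
          else pvCutBands B0 S 0 from rfl]
    rw [pvCutBands_length]
    by_cases hcond : ((S.length + 1 : Nat) : Int) > k
    · rw [if_pos hcond]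
      -- the loop takes a step
      have hklen : k.toNat ≤ S.length := by omega
      have hSne : S ≠ [] := by
        intro h0; subst h0; simp at hcond; omega
      -- names for the gap lists
      set g := fun i => pvGap B0 i with hg
      have hvs : pvGapsA (pvCutBands B0 S 0) = (S.map g).zipIdx 0 := pvGapsA_cutBands B0 S 0
      set vs := S.map g with hvsdef
      have hvsne : vs ≠ [] := by simp [hvsdef, hSne]
      rw [hvs]
      -- the sorted gap list is nonempty
      have hsne : PySem.List.sorted (vs.zipIdx 0) (fun x => x.1) false ≠ [] := by
        intro h0
        rw [PySem.List.sorted_eq_nil_iff] at h0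
        simp [hvsne] at h0
      split
      case _ heq => exact absurd heq hsne
      case _ v j t0 heq =>
      have hsorted := heq
      -- facts about (v, j)
      have hmemtag : (v, j) ∈ vs.zipIdx 0 := by
        have := PySem.List.mem_sorted (xs := vs.zipIdx 0) (key := fun x => x.1)
          (rev := false) (x := (v, j))
        rw [hsorted] at this
        exact this.1 (List.mem_cons_self ..)
      have hjlt : j < vs.length := by
        have := List.mem_zipIdx hmemtag
        omega
      have hjS : j < S.length := by
        rw [hvsdef] at hjlt; simpa using hjlt
      -- (v, j) is lex-least among the tagged gaps
      have htagleast : ∀ q ∈ vs.zipIdx 0, q = (v, j) ∨ pvLexLt (v, j) q :=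
        pvHead_least (PySem.List.sorted_perm _ _ _).symm
          (pvSortedA_pairwise _ (pvZipIdx_sndlt vs 0)) hsorted
      -- the head of L
      have hLne : L ≠ [] := by
        intro h0; subst h0
        exact hSne (by simpa using hperm.eq_nil)
      obtain ⟨p, T, hLcons⟩ := List.exists_cons_of_ne_nil hLne
      have hgsleast : ∀ q ∈ S.map (fun i => (pvGap B0 i, i)), q = p ∨ pvLexLt p q :=
        pvHead_least hperm hL hLcons
      -- identify p with the element at position j
      set gs := S.map (fun i => (pvGap B0 i, i)) with hgsdef
      have hgslen : gs.length = S.length := by simp [hgsdef]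
      have hgsget : ∀ (i : Nat) (hi : i < S.length), gs[i]'(by omega) = (vs[i]'(by rw [hvsdef]; simpa), S[i]) := by
        intro i hi
        simp [hgsdef, hvsdef, hg]
      have hSmono : ∀ (a b : Nat) (ha : a < S.length) (hb : b < S.length), a < b → S[a] < S[b] :=
        fun a b ha hb hab => List.pairwise_iff_getElem.1 hS a b ha hb hab
      have hpmem : p ∈ gs := hperm.mem_iff.2 (hLcons ▸ List.mem_cons_self ..)
      obtain ⟨j', hj', hpj'⟩ := List.mem_iff_getElem.1 hpmem
      have hj'S : j' < S.length := by omega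
      have hvslen : vs.length = S.length := by simp [hvsdef]
      -- compare at both positions
      have h1 := htagleast ((vs.zipIdx 0)[j']'(by simp [List.length_zipIdx]; omega))
        (List.getElem_mem _)
      rw [List.getElem_zipIdx] at h1
      have h2 := hgsleast (gs[j]'(by omega)) (List.getElem_mem _)
      rw [hgsget j hjS] at h2
      rw [hgsget j' hj'S] at hpj'
      have hjj' : j' = j := by
        rcases h1 with h1 | h1
        · -- (vs[j'], 0 + j') = (v, j)
          have : j' = j := by
            have := congrArg Prod.snd h1; simpa using this
          exact this
        · rcases h2 with h2 | h2
          · -- (vs[j], S[j]) = p = (vs[j'], S[j'])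
            rw [← hpj'] at h2
            have hs : S[j] = S[j'] := congrArg Prod.snd h2
            by_contra hne
            rcases Nat.lt_or_ge j' j with hlt | hge
            · have := hSmono j' j hj'S hjS hlt; omega
            · have : j < j' := by omega
              have := hSmono j j' hjS hj'S this; omega
          · -- pvLexLt (v, j) (vs[j'], j') and pvLexLt p (vs[j], S[j])
            rw [← hpj'] at h2
            -- h1 : pvLexLt (v, j) (vs[j'], 0 + j'); also v = vs[j]
            have hv : v = vs[j]'(by omega) := by
              have := List.mem_zipIdx hmemtag
              have hveq := this.2.2
              simpa using hveq
            rw [hv] at h1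
            unfold pvLexLt at h1 h2
            simp only at h1 h2
            by_contra hne
            have hSj : j < j' ∨ j' < j := by omega
            rcases hSj with hlt | hlt
            · have := hSmono j j' hjS hj'S hlt
              omega
            · have := hSmono j' j hj'S hjS hlt
              omega
      subst hjj'
      have hpj : p = (vs[j']'(by omega), S[j']) := hpj'.symm
      -- perform the surgery
      rw [pvSurgery B0 S 0 j' hjS]
      -- apply the induction hypothesis
      have hperm' : ((S.eraseIdx j').map (fun i => (pvGap B0 i, i))).Perm T := by
        rw [← List.eraseIdx_map]
        have hgsplit : gs = gs.take j' ++ gs[j']'(by omega) :: gs.drop (j'+1) := by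
          conv_lhs => rw [← List.take_append_drop j' gs]
          rw [List.drop_eq_getElem_cons (by omega)]
        have hmid : gs.Perm (gs[j']'(by omega) :: (gs.take j' ++ gs.drop (j'+1))) := by
          conv_lhs => rw [hgsplit]
          exact List.perm_middle
        have herase : gs.eraseIdx j' = gs.take j' ++ gs.drop (j'+1) := by
          rw [List.eraseIdx_eq_take_drop_succ]
        have hstep : (p :: T).Perm (gs[j']'(by omega) :: gs.eraseIdx j') := by
          rw [herase]
          exact (hLcons ▸ hperm.symm).trans hmid
        rw [hgsget j' hj'S, hpj'] at hstep
        exact ((List.perm_cons _).1 hstep).symm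
      have hres := ih (S.eraseIdx j') T (hS.sublist (List.eraseIdx_sublist S j'))
        hperm' (by rw [hLcons] at hL; exact (List.pairwise_cons.1 hL).2)
        (by rw [List.length_eraseIdx_of_lt hjS]; omega)
      rw [hres, hLcons]
      have hS1 : 0 < S.length := List.length_pos_iff.2 hSne
      have hd : T.drop ((S.eraseIdx j').length + 1 - k.toNat) = (p :: T).drop (S.length + 1 - k.toNat) := by
        rw [List.length_eraseIdx_of_lt hjS]
        have h1 : S.length + 1 - k.toNat = (S.length - 1 + 1 - k.toNat) + 1 := by omega
        rw [h1, List.drop_succ_cons]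
      rw [hd]
    · rw [if_neg hcond]
      -- the loop stops; the drop is empty and sorting the snd projection gives back S
      have hlek : S.length + 1 ≤ k.toNat := by omega
      have hdrop : S.length + 1 - k.toNat = 0 := by omega
      rw [hdrop, List.drop_zero]
      have hmap : (S.map (fun i => (pvGap B0 i, i))).map (fun p => p.2) = S := by
        rw [List.map_map]
        show S.map (fun i => i) = S
        simp
      have hperm2 : S.Perm (L.map (fun p => p.2)) := by
        have h := hperm.map (fun p => p.2)
        rw [hmap] at h
        exact h
      rw [PySem.List.sorted_eq_of_perm_of_pairwise_lt _ S _ hperm2 (by simpa using hS)]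

theorem pvUniY_zero (base rem : Int) (hr : 0 ≤ rem) : pvUniY base rem 0 = 0 := by
  unfold pvUniY; split_ifs <;> omega

theorem pvUniStep (base rem : Int) (hb : 0 ≤ base) (j : Nat) :
    pvUniY base rem (j+1) = pvUniY base rem j + max 1 (base + (if (j : Int) < rem then 1 else 0)) := by
  unfold pvUniY
  by_cases h1 : base ≥ 1
  · rw [if_pos h1, if_pos h1]
    have hc : ((j + 1 : Nat) : Int) = (j : Int) + 1 := by push_cast; ring
    rw [hc]
    by_cases h3 : (j : Int) < rem
    · rw [if_pos h3, max_eq_right (by omega)]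
      have hmin : min ((j : Int) + 1) rem = min (j : Int) rem + 1 := by omega
      rw [hmin]; ring
    · rw [if_neg h3, max_eq_right (by omega)]
      have hmin : min ((j : Int) + 1) rem = min (j : Int) rem := by omega
      rw [hmin]; ring
  · rw [if_neg h1, if_neg h1]
    have hb0 : base = 0 := by omega
    subst hb0
    have hmax : max 1 ((0 : Int) + (if (j : Int) < rem then 1 else 0)) = 1 := by
      split_ifs <;> omega
    rw [hmax]; push_cast; ring

theorem pvUniFold (base rem : Int) (hb : 0 ≤ base) (hr : 0 ≤ rem) :
    ∀ (m : Nat),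
      (List.range m).foldl
        (fun (acc : List (Int × Int) × Int) (i : Nat) =>
          (acc.1 ++ [(acc.2, acc.2 + max 1 (base + (if (i : Int) < rem then 1 else 0)))],
           acc.2 + max 1 (base + (if (i : Int) < rem then 1 else 0)))) ([], 0)
      = ((List.range m).map (fun i => (pvUniY base rem i, pvUniY base rem (i+1))), pvUniY base rem m) := by
  intro m
  induction m with
  | zero => simp [pvUniY_zero base rem hr]
  | succ m ih =>
    rw [List.range_succ, List.foldl_append, ih, List.map_append]
    simp only [List.foldl_cons, List.foldl_nil, List.map_cons, List.map_nil]
    rw [← pvUniStep base rem hb m]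

theorem pvUniform (mask_h k : Int) (hk : 2 ≤ k) :
    uniform_bands mask_h k
      = (List.range (k.toNat - 1)).map
          (fun i => (pvUniY (PySem.Int.floordiv (max 1 mask_h) k) (PySem.Int.mod (max 1 mask_h) k) i,
                     pvUniY (PySem.Int.floordiv (max 1 mask_h) k) (PySem.Int.mod (max 1 mask_h) k) (i+1)))
        ++ [(pvUniY (PySem.Int.floordiv (max 1 mask_h) k) (PySem.Int.mod (max 1 mask_h) k) (k.toNat - 1), max 1 mask_h)] := by
  have hkpos : (0 : Int) < k := by omega
  have hb : 0 ≤ PySem.Int.floordiv (max 1 mask_h) k := by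
    rw [PySem.Int.floordiv_eq_ediv_of_pos hkpos]
    exact Int.ediv_nonneg (by omega) (by omega)
  have hr : 0 ≤ PySem.Int.mod (max 1 mask_h) k := PySem.Int.mod_nonneg _ hkpos
  unfold uniform_bands
  rw [if_neg (by omega)]
  simp only
  rw [pvUniFold _ _ hb hr k.toNat]
  obtain ⟨t, ht⟩ : ∃ t, k.toNat = t + 1 := ⟨k.toNat - 1, by omega⟩
  rw [ht]
  simp only [Nat.add_sub_cancel]
  rw [List.range_succ, List.map_append]
  simp only [List.map_cons, List.map_nil]
  rw [List.dropLast_concat, List.getLastD_concat]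

-- ===== VERDICT (by name: the statement is the Claim_ definition above) =====
theorem select_bands_for_k_spec : Claim_equal_select_bands_for_k := by
  unfold Claim_equal_select_bands_for_k
  intro raw k mask_h _
  unfold Spec_select_bands_for_k select_bands_for_k select_bands_for_k_alt
  by_cases hk1 : k ≤ 1
  · rw [if_pos hk1, if_pos hk1]
  · rw [if_neg hk1, if_neg hk1]
    have hk : 2 ≤ k := by omega
    simp only
    set bands := PySem.List.sorted
      ((raw.filter (fun p => p.2 > p.1)).map (fun p => (max 0 p.1, min mask_h p.2)))
      (fun x => x.1) false with hbands
    by_cases heq : (bands.length : Int) = k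
    · rw [if_pos heq, if_pos heq]
    · rw [if_neg heq, if_neg heq]
      by_cases hgt : (bands.length : Int) > k
      · rw [if_pos hgt, if_pos hgt]
        have hne : bands ≠ [] := by
          intro h0
          rw [h0] at hgt; simp at hgt; omega
        unfold merge_bands_to_k
        rw [if_neg (by omega)]
        have hstart : bands = pvCutBands bands (List.range (bands.length - 1)) 0 := (pvCutBands_range bands hne).symm
        have hgaps : (List.range (bands.length - 1)).map (fun i => (pvGap bands i, i)) = pvGapsA bands := rfl
        have hperm : ((List.range (bands.length - 1)).map (fun i => (pvGap bands i, i))).Perm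
            (PySem.List.sorted2 (pvGapsA bands) (fun x => x.1) (fun x => x.2) false) := by
          rw [hgaps]
          exact (PySem.List.sorted2_perm _ _ _ _).symm
        have hpw : (PySem.List.sorted2 (pvGapsA bands) (fun x => x.1) (fun x => x.2) false).Pairwise pvLexLt := by
          apply pvSorted2_pairwise
          unfold pvGapsA
          exact (List.pairwise_map.2 (by simpa using List.pairwise_lt_range (n := bands.length - 1)))
        have hfuel : (List.range (bands.length - 1)).length ≤ bands.length := by simp
        have := pvLoopA bands k hk bands.length (List.range (bands.length - 1))
          (PySem.List.sorted2 (pvGapsA bands) (fun x => x.1) (fun x => x.2) false)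
          List.pairwise_lt_range hperm hpw hfuel
        rw [← hstart] at this
        rw [this]
        have hlen : (List.range (bands.length - 1)).length + 1 - k.toNat = bands.length - k.toNat := by
          have h1 : 1 ≤ bands.length := List.length_pos_iff.2 hne
          simp
          omega
        rw [hlen]
      · rw [if_neg hgt, if_neg hgt]
        rw [pvUniform mask_h k hk]
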